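-- pv_equiv track=rewrite | github.com/seelengxd/aoc-2023 | day10/day10.py | map_expander
-- ===== SOURCE A (Python) =====
-- def map_expander(data):
--     m = len(data)
--     n = len(data[0])
--     mapper = {
--         "|": [
--             ["X", "|", "X"],
--             ["X", "|", "X"],
--             ["X", "|", "X"]],
--         "-": [
--             ["X", "X", "X"],
--             ["-", "-", "-"],
--             ["X", "X", "X"]],
--         "L": [
--             ["X", "|", "X"],
--             ["X", "L", "-"],
--             ["X", "X", "X"]],
--         "J": [
--             ["X", "|", "X"],
--             ["-", "J", "X"],
--             ["X", "X", "X"]],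
--         "7": [
--             ["X", "X", "X"],
--             ["-", "7", "X"],
--             ["X", "|", "X"]],
--         "F": [
--             ["X", "X", "X"],
--             ["X", "F", "-"],
--             ["X", "|", "X"]],
--         ".": [
--             ["X", "X", "X"],
--             ["X", ".", "X"],
--             ["X", "X", "X"]]
--     }
--     new_map = [[None] * (n * 3) for _ in range(m * 3)]
--     for i in range(m):
--         for j in range(n):
--             pipe = data[i][j]
--             pipe_expanded = mapper[pipe]
--             start_x = i * 3
--             start_y = j * 3
--             for a in range(3):
--                 for b in range(3):
--                     new_map[start_x + a][start_y + b] = pipe_expanded[a][b]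
--     return new_map
-- ===== SOURCE B (Python) =====
-- def map_expander(data):
--     # each pipe's 3x3 block is determined by which directions it connects:
--     # "|" above iff it connects up, "|" below iff down, "-" beside iff left/right,
--     # the pipe char itself in the centre, "X" everywhere else.
--     n = len(data[0])
--     up, down, left, right = "|LJ", "|7F", "-J7", "-LF"
--     out = []
--     for row in data:
--         cells = [row[j] for j in range(n)]
--         out.append([s for c in cells
--                     for s in (["X", "|", "X"] if c in up else ["X", "X", "X"])])
--         out.append([s for c in cells
--                     for s in [("-" if c in left else "X"), c,
--                               ("-" if c in right else "X")]])
--         out.append([s for c in cells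
--                     for s in (["X", "|", "X"] if c in down else ["X", "X", "X"])])
--     return out
-- ===== Notes on version B (the rewrite author's own statement) =====
-- stated objective: alternative
-- what changed: B drops the 3x3-block mapper dict and the preallocated 3m x 3n scatter-written grid entirely: it derives each block from the pipe's connection directions (membership in up/down/left/right strings) and emits the three output rows of each input row directly by concatenation.
import Mathlib
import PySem

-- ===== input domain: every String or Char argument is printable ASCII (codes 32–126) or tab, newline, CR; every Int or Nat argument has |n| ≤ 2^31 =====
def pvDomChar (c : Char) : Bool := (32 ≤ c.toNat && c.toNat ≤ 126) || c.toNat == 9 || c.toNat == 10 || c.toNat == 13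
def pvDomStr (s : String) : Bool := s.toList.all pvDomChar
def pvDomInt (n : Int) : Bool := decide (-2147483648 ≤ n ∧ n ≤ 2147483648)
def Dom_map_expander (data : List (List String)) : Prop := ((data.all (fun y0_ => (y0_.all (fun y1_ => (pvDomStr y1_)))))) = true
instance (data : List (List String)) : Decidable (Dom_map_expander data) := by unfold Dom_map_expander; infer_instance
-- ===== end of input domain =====

-- B derives each 3x3 block from the pipe's connection directions and emits output rows by
-- concatenation, instead of A's mapper dict scatter-written into a preallocated 3m x 3n grid.

-- ===== PORT A =====
-- the mapper dict of A
def pvMapper : PySem.Dict String (List (List String)) := PySem.Dict.ofList [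
  ("|", [["X","|","X"],["X","|","X"],["X","|","X"]]),
  ("-", [["X","X","X"],["-","-","-"],["X","X","X"]]),
  ("L", [["X","|","X"],["X","L","-"],["X","X","X"]]),
  ("J", [["X","|","X"],["-","J","X"],["X","X","X"]]),
  ("7", [["X","X","X"],["-","7","X"],["X","|","X"]]),
  ("F", [["X","X","X"],["X","F","-"],["X","|","X"]]),
  (".", [["X","X","X"],["X",".","X"],["X","X","X"]])]

-- mapper[pipe]; a missing key is a Python KeyError, excluded by Pre_ (the [] default is never read there)
def pvBlock (c : String) : List (List String) := (PySem.Dict.get? pvMapper c).getD []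

-- A's two innermost loops: write one 3×3 block at (sx, sy) into the grid
def pvWriteBlk (pe : List (List String)) (sx sy : Nat) (g : List (List String)) : List (List String) :=
  (List.range 3).foldl (fun g a =>
    (List.range 3).foldl (fun g b =>
      g.modify (sx + a) (fun row => row.set (sy + b) ((pe.getD a []).getD b ""))) g) g

-- A's j-loop for row i (data[i][j]: an out-of-range j is a Python IndexError, excluded by Pre_)
def pvInnerA (data : List (List String)) (i n : Nat) (g : List (List String)) : List (List String) :=
  (List.range n).foldl (fun g j => pvWriteBlk (pvBlock ((data.getD i []).getD j "")) (i*3) (j*3) g) g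

def map_expander (data : List (List String)) : List (List String) :=
  let m := data.length
  let n := (data.headD []).length   -- len(data[0]); data = [] is a Python IndexError, excluded by Pre_
  -- Python preallocates the grid with None; "" stands for None and is always overwritten under Pre_
  let new_map := List.replicate (m*3) (List.replicate (n*3) "")
  (List.range m).foldl (fun g i => pvInnerA data i n g) new_map

-- ===== PORT B =====
-- Source B's three per-row comprehensions; 'c in s' is Python substring membership = PySem.Str.isIn
def pvTopRow (cells : List String) : List String :=
  cells.flatMap (fun c => if PySem.Str.isIn c "|LJ" then ["X","|","X"] else ["X","X","X"])
def pvMidRow (cells : List String) : List String :=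
  cells.flatMap (fun c => [(if PySem.Str.isIn c "-J7" then "-" else "X"), c,
                           (if PySem.Str.isIn c "-LF" then "-" else "X")])
def pvBotRow (cells : List String) : List String :=
  cells.flatMap (fun c => if PySem.Str.isIn c "|7F" then ["X","|","X"] else ["X","X","X"])

def map_expander_alt (data : List (List String)) : List (List String) :=
  let n := (data.headD []).length
  data.foldl (fun out row =>
    let cells := (List.range n).map (fun j => row.getD j "")
    out ++ [pvTopRow cells, pvMidRow cells, pvBotRow cells]) []

-- ===== PRECONDITION & SPEC =====
def pvKeys : List String := ["|","-","L","J","7","F","."]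

-- exactly the inputs on which Python A returns: data nonempty (else data[0] is an IndexError) and every
-- cell actually read (the first len(data[0]) entries of each row) exists and is a mapper key
-- (else IndexError / KeyError)
def Pre_map_expander (data : List (List String)) : Prop :=
  data ≠ [] ∧ ∀ row ∈ data, ∀ j < (data.headD []).length, row.getD j "" ∈ pvKeys

instance (data : List (List String)) : Decidable (Pre_map_expander data) := by
  unfold Pre_map_expander; infer_instance

def pvWitness_map_expander : List (List String) := [["|","-"],[".","F"]]

def Spec_map_expander (data : List (List String)) (out : List (List String)) : Prop := out = map_expander_alt data
instance (data : List (List String)) (out : List (List String)) : Decidable (Spec_map_expander data out) := by unfold Spec_map_expander; infer_instance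

-- ===== CLAIM (what is proved, stated in full; the proofs are below) =====
def Claim_equal_map_expander : Prop := ∀ (data : List (List String)), Dom_map_expander data → Pre_map_expander data → Spec_map_expander data (map_expander data)

-- ===== LEMMAS AND PROOFS =====

-- one output segment contributed by cells js of a data row, as A writes it (three getD-cells per block)
def pvSeg3 (row : List String) (a : Nat) (js : List Nat) : List String :=
  (js.map (fun j => [((pvBlock (row.getD j "")).getD a []).getD 0 "",
                     ((pvBlock (row.getD j "")).getD a []).getD 1 "",
                     ((pvBlock (row.getD j "")).getD a []).getD 2 ""])).flatten

theorem pv_set_at0 {p t : List String} {x : String} {k : Nat} (hk : k = p.length) (v : String) :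
    (p ++ x :: t).set k v = p ++ v :: t := by
  subst hk
  induction p with
  | nil => rfl
  | cons h tl ih => simp [ih]

theorem pv_set_at1 {p t : List String} {x0 x1 : String} {k : Nat} (hk : k = p.length + 1) (v : String) :
    (p ++ x0 :: x1 :: t).set k v = p ++ x0 :: v :: t := by
  subst hk
  induction p with
  | nil => rfl
  | cons h tl ih => simp [ih]

theorem pv_set_at2 {p t : List String} {x0 x1 x2 : String} {k : Nat} (hk : k = p.length + 2) (v : String) :
    (p ++ x0 :: x1 :: x2 :: t).set k v = p ++ x0 :: x1 :: v :: t := by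
  subst hk
  induction p with
  | nil => rfl
  | cons h tl ih => simp [ih]

theorem pv_mod_at0 {done rs : List (List String)} {r0 : List String} {k : Nat}
    (hk : k = done.length) (f : List String → List String) :
    (done ++ r0 :: rs).modify k f = done ++ f r0 :: rs := by
  subst hk
  induction done with
  | nil => rfl
  | cons h tl ih => simp [ih]

theorem pv_mod_at1 {done rs : List (List String)} {r0 r1 : List String} {k : Nat}
    (hk : k = done.length + 1) (f : List String → List String) :
    (done ++ r0 :: r1 :: rs).modify k f = done ++ r0 :: f r1 :: rs := by
  subst hk
  induction done with
  | nil => rfl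
  | cons h tl ih => simp [ih]

theorem pv_mod_at2 {done rs : List (List String)} {r0 r1 r2 : List String} {k : Nat}
    (hk : k = done.length + 2) (f : List String → List String) :
    (done ++ r0 :: r1 :: r2 :: rs).modify k f = done ++ r0 :: r1 :: f r2 :: rs := by
  subst hk
  induction done with
  | nil => rfl
  | cons h tl ih => simp [ih]

theorem pv_row_write0 {done rs : List (List String)} {p t : List String} {k kj : Nat}
    (hk : k = done.length) (hkj : kj = p.length) (v0 v1 v2 : String) (x0 x1 x2 : String) :
    ((((done ++ (p ++ x0 :: x1 :: x2 :: t) :: rs).modify k (fun row => row.set (kj+0) v0)).modify k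
        (fun row => row.set (kj+1) v1)).modify k (fun row => row.set (kj+2) v2))
    = done ++ (p ++ v0 :: v1 :: v2 :: t) :: rs := by
  rw [pv_mod_at0 hk]
  rw [pv_set_at0 (by omega) v0]
  rw [pv_mod_at0 hk]
  rw [pv_set_at1 (by omega) v1]
  rw [pv_mod_at0 hk]
  rw [pv_set_at2 (by omega) v2]

theorem pv_row_write1 {done rs : List (List String)} {r0 p t : List String} {k kj : Nat}
    (hk : k = done.length + 1) (hkj : kj = p.length) (v0 v1 v2 : String) (x0 x1 x2 : String) :
    ((((done ++ r0 :: (p ++ x0 :: x1 :: x2 :: t) :: rs).modify k (fun row => row.set (kj+0) v0)).modify k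
        (fun row => row.set (kj+1) v1)).modify k (fun row => row.set (kj+2) v2))
    = done ++ r0 :: (p ++ v0 :: v1 :: v2 :: t) :: rs := by
  rw [pv_mod_at1 hk]
  rw [pv_set_at0 (by omega) v0]
  rw [pv_mod_at1 hk]
  rw [pv_set_at1 (by omega) v1]
  rw [pv_mod_at1 hk]
  rw [pv_set_at2 (by omega) v2]

theorem pv_row_write2 {done rs : List (List String)} {r0 r1 p t : List String} {k kj : Nat}
    (hk : k = done.length + 2) (hkj : kj = p.length) (v0 v1 v2 : String) (x0 x1 x2 : String) :
    ((((done ++ r0 :: r1 :: (p ++ x0 :: x1 :: x2 :: t) :: rs).modify k (fun row => row.set (kj+0) v0)).modify k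
        (fun row => row.set (kj+1) v1)).modify k (fun row => row.set (kj+2) v2))
    = done ++ r0 :: r1 :: (p ++ v0 :: v1 :: v2 :: t) :: rs := by
  rw [pv_mod_at2 hk]
  rw [pv_set_at0 (by omega) v0]
  rw [pv_mod_at2 hk]
  rw [pv_set_at1 (by omega) v1]
  rw [pv_mod_at2 hk]
  rw [pv_set_at2 (by omega) v2]

theorem pvWriteBlk_eq (pe : List (List String)) (i j : Nat)
    (done rest : List (List String)) (p0 p1 p2 t0 t1 t2 : List String)
    (hd : done.length = i*3) (h0 : p0.length = j*3) (h1 : p1.length = j*3) (h2 : p2.length = j*3) :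
    pvWriteBlk pe (i*3) (j*3)
      (done ++ (p0 ++ "" :: "" :: "" :: t0) :: (p1 ++ "" :: "" :: "" :: t1)
            :: (p2 ++ "" :: "" :: "" :: t2) :: rest)
    = done ++ (p0 ++ ((pe.getD 0 []).getD 0 "") :: ((pe.getD 0 []).getD 1 "") :: ((pe.getD 0 []).getD 2 "") :: t0)
            :: (p1 ++ ((pe.getD 1 []).getD 0 "") :: ((pe.getD 1 []).getD 1 "") :: ((pe.getD 1 []).getD 2 "") :: t1)
            :: (p2 ++ ((pe.getD 2 []).getD 0 "") :: ((pe.getD 2 []).getD 1 "") :: ((pe.getD 2 []).getD 2 "") :: t2)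
            :: rest := by
  simp only [pvWriteBlk, show List.range 3 = [0,1,2] from rfl, List.foldl_cons, List.foldl_nil]
  rw [pv_row_write0 (by omega) (by omega)]
  rw [pv_row_write1 (by omega) (by omega)]
  rw [pv_row_write2 (by omega) (by omega)]

theorem pvInner_loop (data : List (List String)) (i : Nat) :
    ∀ (c j0 : Nat) (done rest : List (List String)) (r0 r1 r2 p0 p1 p2 : List String),
    done.length = i*3 → p0.length = j0*3 → p1.length = j0*3 → p2.length = j0*3 →
    r0 = p0 ++ List.replicate (c*3) "" → r1 = p1 ++ List.replicate (c*3) "" →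
    r2 = p2 ++ List.replicate (c*3) "" →
    (List.range' j0 c).foldl (fun g j => pvWriteBlk (pvBlock ((data.getD i []).getD j "")) (i*3) (j*3) g)
       (done ++ r0 :: r1 :: r2 :: rest)
    = done ++ (p0 ++ pvSeg3 (data.getD i []) 0 (List.range' j0 c))
            :: (p1 ++ pvSeg3 (data.getD i []) 1 (List.range' j0 c))
            :: (p2 ++ pvSeg3 (data.getD i []) 2 (List.range' j0 c)) :: rest := by
  intro c
  induction c with
  | zero =>
    intro j0 done rest r0 r1 r2 p0 p1 p2 hd h0 h1 h2 hr0 hr1 hr2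
    subst hr0 hr1 hr2
    simp [pvSeg3]
  | succ c ih =>
    intro j0 done rest r0 r1 r2 p0 p1 p2 hd h0 h1 h2 hr0 hr1 hr2
    subst hr0 hr1 hr2
    rw [List.range'_succ, List.foldl_cons]
    have hrep : List.replicate ((c+1)*3) ("" : String) = "" :: "" :: "" :: List.replicate (c*3) "" := by
      rw [show (c+1)*3 = c*3+1+1+1 by ring]
      rw [List.replicate_succ, List.replicate_succ, List.replicate_succ]
    rw [hrep]
    rw [pvWriteBlk_eq _ i j0 done rest p0 p1 p2 _ _ _ hd h0 h1 h2]
    rw [ih (j0+1) done rest _ _ _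
        (p0 ++ [((pvBlock ((data.getD i []).getD j0 "")).getD 0 []).getD 0 "",
                ((pvBlock ((data.getD i []).getD j0 "")).getD 0 []).getD 1 "",
                ((pvBlock ((data.getD i []).getD j0 "")).getD 0 []).getD 2 ""])
        (p1 ++ [((pvBlock ((data.getD i []).getD j0 "")).getD 1 []).getD 0 "",
                ((pvBlock ((data.getD i []).getD j0 "")).getD 1 []).getD 1 "",
                ((pvBlock ((data.getD i []).getD j0 "")).getD 1 []).getD 2 ""])
        (p2 ++ [((pvBlock ((data.getD i []).getD j0 "")).getD 2 []).getD 0 "",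
                ((pvBlock ((data.getD i []).getD j0 "")).getD 2 []).getD 1 "",
                ((pvBlock ((data.getD i []).getD j0 "")).getD 2 []).getD 2 ""])
        hd (by simp; omega) (by simp; omega) (by simp; omega)
        (by simp) (by simp) (by simp)]
    simp [pvSeg3, List.append_assoc]

theorem pvInnerA_eq (data : List (List String)) (i n : Nat)
    (done rest : List (List String)) (hd : done.length = i*3) :
    pvInnerA data i n
      (done ++ List.replicate (n*3) "" :: List.replicate (n*3) "" :: List.replicate (n*3) "" :: rest)
    = done ++ pvSeg3 (data.getD i []) 0 (List.range n)
            :: pvSeg3 (data.getD i []) 1 (List.range n)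
            :: pvSeg3 (data.getD i []) 2 (List.range n) :: rest := by
  simp only [pvInnerA]
  rw [show List.range n = List.range' 0 n from List.range_eq_range']
  rw [pvInner_loop data i n 0 done rest
      (List.replicate (n*3) "") (List.replicate (n*3) "") (List.replicate (n*3) "")
      [] [] [] hd (by simp) (by simp) (by simp) (by simp) (by simp) (by simp)]
  simp

theorem pvOuter_loop (data : List (List String)) (n : Nat) :
    ∀ (c k : Nat) (done g : List (List String)),
    done.length = k*3 →
    g = done ++ List.replicate (c*3) (List.replicate (n*3) "") →
    (List.range' k c).foldl (fun g i => pvInnerA data i n g) g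
    = done ++ ((List.range' k c).map (fun i =>
        (List.range 3).map (fun a => pvSeg3 (data.getD i []) a (List.range n)))).flatten := by
  intro c
  induction c with
  | zero =>
    intro k done g hd hg
    subst hg
    simp
  | succ c ih =>
    intro k done g hd hg
    subst hg
    rw [List.range'_succ, List.foldl_cons]
    have hrep : List.replicate ((c+1)*3) (List.replicate (n*3) ("" : String))
        = List.replicate (n*3) "" :: List.replicate (n*3) "" :: List.replicate (n*3) ""
          :: List.replicate (c*3) (List.replicate (n*3) "") := by
      rw [show (c+1)*3 = c*3+1+1+1 by ring]
      rw [List.replicate_succ, List.replicate_succ, List.replicate_succ]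
    rw [hrep]
    rw [pvInnerA_eq data k n done (List.replicate (c*3) (List.replicate (n*3) "")) hd]
    rw [ih (k+1)
        (done ++ [pvSeg3 (data.getD k []) 0 (List.range n),
                  pvSeg3 (data.getD k []) 1 (List.range n),
                  pvSeg3 (data.getD k []) 2 (List.range n)])
        (done ++ pvSeg3 (data.getD k []) 0 (List.range n)
              :: pvSeg3 (data.getD k []) 1 (List.range n)
              :: pvSeg3 (data.getD k []) 2 (List.range n)
              :: List.replicate (c*3) (List.replicate (n*3) ""))
        (by simp; omega) (by simp)]
    simp [List.append_assoc, show List.range 3 = [0,1,2] from rfl]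

-- B's fold appends three output rows per input row
theorem pv_alt_gen (n : Nat) :
    ∀ (rows acc : List (List String)),
    rows.foldl (fun out row =>
      let cells := (List.range n).map (fun j => row.getD j "")
      out ++ [pvTopRow cells, pvMidRow cells, pvBotRow cells]) acc
    = acc ++ (rows.map (fun row =>
        let cells := (List.range n).map (fun j => row.getD j "")
        [pvTopRow cells, pvMidRow cells, pvBotRow cells])).flatten := by
  intro rows
  induction rows with
  | nil => intro acc; simp
  | cons r rs ih =>
    intro acc
    rw [List.foldl_cons, ih]
    simp [List.append_assoc]

theorem pv_map_range_getD {α : Type} (d : α) :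
    ∀ (l pref : List α),
    (List.range' pref.length l.length).map (fun i => (pref ++ l).getD i d) = l := by
  intro l
  induction l with
  | nil => intro pref; simp
  | cons x xs ih =>
    intro pref
    rw [show (x :: xs).length = xs.length + 1 from rfl, List.range'_succ, List.map_cons]
    have h1 : (pref ++ x :: xs).getD pref.length d = x := by simp
    rw [h1]
    have h2 : (List.range' (pref.length + 1) xs.length).map (fun i => (pref ++ x :: xs).getD i d)
        = (List.range' (pref ++ [x]).length xs.length).map (fun i => ((pref ++ [x]) ++ xs).getD i d) := by
      simp [List.append_assoc]
    rw [h2, ih (pref ++ [x])]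

-- on mapper keys, A's three block sub-rows coincide with B's direction-derived cells
theorem pv_row_valid (row : List String) (n : Nat)
    (hval : ∀ j < n, row.getD j "" ∈ pvKeys) :
    (List.range 3).map (fun a => pvSeg3 row a (List.range n))
    = [pvTopRow ((List.range n).map (fun j => row.getD j "")),
       pvMidRow ((List.range n).map (fun j => row.getD j "")),
       pvBotRow ((List.range n).map (fun j => row.getD j ""))] := by
  have hkey : ∀ c ∈ pvKeys,
      ([((pvBlock c).getD 0 []).getD 0 "", ((pvBlock c).getD 0 []).getD 1 "",
        ((pvBlock c).getD 0 []).getD 2 ""]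
         = (if PySem.Str.isIn c "|LJ" then ["X","|","X"] else ["X","X","X"]))
      ∧ ([((pvBlock c).getD 1 []).getD 0 "", ((pvBlock c).getD 1 []).getD 1 "",
          ((pvBlock c).getD 1 []).getD 2 ""]
         = [(if PySem.Str.isIn c "-J7" then "-" else "X"), c,
            (if PySem.Str.isIn c "-LF" then "-" else "X")])
      ∧ ([((pvBlock c).getD 2 []).getD 0 "", ((pvBlock c).getD 2 []).getD 1 "",
          ((pvBlock c).getD 2 []).getD 2 ""]
         = (if PySem.Str.isIn c "|7F" then ["X","|","X"] else ["X","X","X"])) := by decide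
  simp only [show List.range 3 = [0,1,2] from rfl, List.map_cons, List.map_nil,
    pvTopRow, pvMidRow, pvBotRow, pvSeg3, List.flatMap_def, List.map_map]
  refine List.cons_eq_cons.mpr ⟨?_, List.cons_eq_cons.mpr ⟨?_, List.cons_eq_cons.mpr ⟨?_, rfl⟩⟩⟩ <;>
  · congr 1
    apply List.map_congr_left
    intro j hj
    have h := hkey _ (hval j (List.mem_range.mp hj))
    first
      | exact h.1
      | exact h.2.1
      | exact h.2.2

-- ===== VERDICT (by name: the statement is the Claim_ definition above) =====
theorem map_expander_spec : Claim_equal_map_expander := by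
  intro data _hdom hpre
  obtain ⟨_hne, hval⟩ := hpre
  show map_expander data = map_expander_alt data
  have hA : map_expander data
      = ((List.range' 0 data.length).map (fun i =>
          (List.range 3).map (fun a =>
            pvSeg3 (data.getD i []) a (List.range (data.headD []).length)))).flatten := by
    simp only [map_expander]
    rw [show List.range data.length = List.range' 0 data.length from List.range_eq_range']
    rw [pvOuter_loop data (data.headD []).length data.length 0 [] _ (by simp) (by simp)]
    simp
  have hMap : (List.range' 0 data.length).map (fun i =>
        (List.range 3).map (fun a =>
          pvSeg3 (data.getD i []) a (List.range (data.headD []).length)))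
      = data.map (fun row =>
        (List.range 3).map (fun a =>
          pvSeg3 row a (List.range (data.headD []).length))) := by
    have h0 : (List.range' 0 data.length).map (fun i => data.getD i ([] : List String)) = data := by
      simpa using pv_map_range_getD ([] : List String) data []
    set N := (data.headD []).length with hN
    conv_rhs => rw [← h0, List.map_map]
    rfl
  have hB : map_expander_alt data
      = (data.map (fun row =>
          let cells := (List.range (data.headD []).length).map (fun j => row.getD j "")
          [pvTopRow cells, pvMidRow cells, pvBotRow cells])).flatten := by
    simp only [map_expander_alt]
    rw [pv_alt_gen (data.headD []).length data []]
    simp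
  rw [hA, hMap, hB]
  congr 1
  apply List.map_congr_left
  intro row hrow
  exact pv_row_valid row _ (hval row hrow)
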